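-- pv_equiv track=rewrite | github.com/Kethanvr/About-WordList-Gen | word_list.py | filter_wordlist
-- ===== SOURCE A (Python) =====
-- special_chars = ["!", "@", "#", "$", "_", ".", "-", "*", "&", "+", "=", "%", "^"]
--
-- def filter_wordlist(wordlist, min_length=8, max_length=20, must_contain=None):
--     """Filter wordlist based on password policy"""
--     filtered = set()
--
--     for word in wordlist:
--         if min_length <= len(word) <= max_length:
--             if must_contain:
--                 # Check if all required character types are present
--                 meets_criteria = True
--                 for criteria in must_contain:
--                     if criteria == 'uppercase' and not any(c.isupper() for c in word):
--                         meets_criteria = False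
--                     elif criteria == 'lowercase' and not any(c.islower() for c in word):
--                         meets_criteria = False
--                     elif criteria == 'digit' and not any(c.isdigit() for c in word):
--                         meets_criteria = False
--                     elif criteria == 'special' and not any(c in special_chars for c in word):
--                         meets_criteria = False
--
--                 if meets_criteria:
--                     filtered.add(word)
--             else:
--                 filtered.add(word)
--
--     return filtered
-- ===== SOURCE B (Python) =====
-- special_chars = ["!", "@", "#", "$", "_", ".", "-", "*", "&", "+", "=", "%", "^"]
--
-- _KNOWN = ("uppercase", "lowercase", "digit", "special")
--
-- def filter_wordlist(wordlist, min_length=8, max_length=20, must_contain=None):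
--     """Filter wordlist based on password policy (single char pass per word)."""
--     filtered = set()
--     for word in wordlist:
--         if not (min_length <= len(word) <= max_length):
--             continue
--         # one pass over the characters: which categories are present
--         present = set()
--         for c in word:
--             if c.isupper():
--                 present.add("uppercase")
--             if c.islower():
--                 present.add("lowercase")
--             if c.isdigit():
--                 present.add("digit")
--             if c in special_chars:
--                 present.add("special")
--         crits = must_contain or []
--         if all(crit in present for crit in crits if crit in _KNOWN):
--             filtered.add(word)
--     return filtered
-- ===== Notes on version B (the rewrite author's own statement) =====
-- stated objective: alternative
-- what changed: Instead of re-scanning the word once per criterion with any(...), B makes a single pass over each word's characters building a set of present category labels and then checks each known criterion against that set.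
import Mathlib
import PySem

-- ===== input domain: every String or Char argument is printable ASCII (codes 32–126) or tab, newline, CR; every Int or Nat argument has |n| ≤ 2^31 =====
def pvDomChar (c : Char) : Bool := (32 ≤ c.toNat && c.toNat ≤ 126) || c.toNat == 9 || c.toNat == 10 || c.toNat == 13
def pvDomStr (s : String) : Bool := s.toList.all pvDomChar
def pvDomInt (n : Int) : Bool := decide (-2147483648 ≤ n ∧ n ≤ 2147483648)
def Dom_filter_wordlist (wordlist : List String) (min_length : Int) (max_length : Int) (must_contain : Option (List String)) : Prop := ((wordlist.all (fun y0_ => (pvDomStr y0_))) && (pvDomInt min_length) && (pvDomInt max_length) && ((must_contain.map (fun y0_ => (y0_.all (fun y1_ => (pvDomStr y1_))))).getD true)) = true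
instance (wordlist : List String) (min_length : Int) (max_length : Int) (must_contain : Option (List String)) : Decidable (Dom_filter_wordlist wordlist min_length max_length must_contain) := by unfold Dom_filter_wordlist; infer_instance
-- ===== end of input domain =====

-- B replaces A's per-criterion any(...) rescans of the word by ONE pass over the
-- characters collecting the set of present category labels, then checks each known
-- criterion against that set (objective: alternative decomposition, same results).

-- ===== PORT A =====
def specialChars : List String := ["!", "@", "#", "$", "_", ".", "-", "*", "&", "+", "=", "%", "^"]

def filter_wordlist (wordlist : List String) (min_length : Int) (max_length : Int) (must_contain : Option (List String)) : List String :=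
  wordlist.foldl (fun filtered word =>
    if min_length ≤ PySem.Str.len word ∧ PySem.Str.len word ≤ max_length then
      match must_contain with
      | some crits =>
        if crits.isEmpty then PySem.Set.add filtered word   -- 'if must_contain:' falsy on []
        else
          let meets := crits.foldl (fun m crit =>
            if crit == "uppercase" && !(word.toList.any PySem.Chars.isupper) then false
            else if crit == "lowercase" && !(word.toList.any PySem.Chars.islower) then false
            else if crit == "digit" && !(word.toList.any PySem.Chars.isdigit) then false
            else if crit == "special" && !(word.toList.any (fun c => specialChars.contains (String.ofList [c]))) then false
            else m) true
          if meets then PySem.Set.add filtered word else filtered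
      | none => PySem.Set.add filtered word
    else filtered) PySem.Set.empty

-- ===== PORT B =====
def knownCriteria : List String := ["uppercase", "lowercase", "digit", "special"]

-- one pass over the characters: which categories are present
def presentCategories (cs : List Char) : PySem.Set String :=
  cs.foldl (fun p c =>
    let p := if PySem.Chars.isupper c then PySem.Set.add p "uppercase" else p
    let p := if PySem.Chars.islower c then PySem.Set.add p "lowercase" else p
    let p := if PySem.Chars.isdigit c then PySem.Set.add p "digit" else p
    if specialChars.contains (String.ofList [c]) then PySem.Set.add p "special" else p)
    PySem.Set.empty

def filter_wordlist_alt (wordlist : List String) (min_length : Int) (max_length : Int) (must_contain : Option (List String)) : List String :=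
  wordlist.foldl (fun filtered word =>
    if ¬ (min_length ≤ PySem.Str.len word ∧ PySem.Str.len word ≤ max_length) then filtered
    else
      let present := presentCategories word.toList
      let crits := must_contain.getD []
      if crits.all (fun crit => !(knownCriteria.contains crit) || PySem.Set.contains present crit)
      then PySem.Set.add filtered word else filtered) PySem.Set.empty

-- ===== PRECONDITION & SPEC =====
def Spec_filter_wordlist (wordlist : List String) (min_length : Int) (max_length : Int) (must_contain : Option (List String)) (out : List String) : Prop := out = filter_wordlist_alt wordlist min_length max_length must_contain
instance (wordlist : List String) (min_length : Int) (max_length : Int) (must_contain : Option (List String)) (out : List String) : Decidable (Spec_filter_wordlist wordlist min_length max_length must_contain out) := by unfold Spec_filter_wordlist; infer_instance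

-- ===== CLAIM (what is proved, stated in full; the proofs are below) =====
def Claim_equal_filter_wordlist : Prop := ∀ (wordlist : List String) (min_length : Int) (max_length : Int) (must_contain : Option (List String)), Dom_filter_wordlist wordlist min_length max_length must_contain → Spec_filter_wordlist wordlist min_length max_length must_contain (filter_wordlist wordlist min_length max_length must_contain)

-- ===== LEMMAS AND PROOFS =====

-- one step of the category pass, as a membership fact
set_option maxHeartbeats 1000000 in
theorem mem_catStep (p : PySem.Set String) (c : Char) (x : String) :
    x ∈ (let p := if PySem.Chars.isupper c then PySem.Set.add p "uppercase" else p
         let p := if PySem.Chars.islower c then PySem.Set.add p "lowercase" else p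
         let p := if PySem.Chars.isdigit c then PySem.Set.add p "digit" else p
         if specialChars.contains (String.ofList [c]) then PySem.Set.add p "special" else p) ↔
      x ∈ p ∨
      (x = "uppercase" ∧ PySem.Chars.isupper c) ∨
      (x = "lowercase" ∧ PySem.Chars.islower c) ∨
      (x = "digit" ∧ PySem.Chars.isdigit c) ∨
      (x = "special" ∧ specialChars.contains (String.ofList [c])) := by
  by_cases hu : PySem.Chars.isupper c <;>
    by_cases hl : PySem.Chars.islower c <;>
      by_cases hd : PySem.Chars.isdigit c <;>
        by_cases hs : String.ofList [c] ∈ specialChars <;>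
          simp [hu, hl, hd, hs, PySem.Set.mem_add] <;> tauto

-- membership in the single-pass category set
set_option maxHeartbeats 1000000 in
theorem mem_presentCategories (cs : List Char) (x : String) :
    x ∈ presentCategories cs ↔
      (x = "uppercase" ∧ cs.any PySem.Chars.isupper) ∨
      (x = "lowercase" ∧ cs.any PySem.Chars.islower) ∨
      (x = "digit" ∧ cs.any PySem.Chars.isdigit) ∨
      (x = "special" ∧ cs.any (fun c => specialChars.contains (String.ofList [c]))) := by
  suffices h : ∀ (p : PySem.Set String), x ∈ cs.foldl (fun p c =>
      let p := if PySem.Chars.isupper c then PySem.Set.add p "uppercase" else p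
      let p := if PySem.Chars.islower c then PySem.Set.add p "lowercase" else p
      let p := if PySem.Chars.isdigit c then PySem.Set.add p "digit" else p
      if specialChars.contains (String.ofList [c]) then PySem.Set.add p "special" else p) p ↔
      x ∈ p ∨
      (x = "uppercase" ∧ cs.any PySem.Chars.isupper) ∨
      (x = "lowercase" ∧ cs.any PySem.Chars.islower) ∨
      (x = "digit" ∧ cs.any PySem.Chars.isdigit) ∨
      (x = "special" ∧ cs.any (fun c => specialChars.contains (String.ofList [c]))) by
    have := h PySem.Set.empty
    simpa [presentCategories, PySem.Set.empty] using this
  induction cs with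
  | nil => intro p; simp
  | cons c cs ih =>
    intro p
    simp only [List.foldl_cons, List.any_cons]
    rw [ih, mem_catStep]
    simp only [Bool.or_eq_true]
    tauto

-- A's criteria loop never resets meets_criteria to true: it is an 'all'
theorem foldl_if_false (l : List String) (p : String → Bool) (b : Bool) :
    l.foldl (fun m crit => if p crit then false else m) b = (b && l.all (fun crit => !(p crit))) := by
  induction l generalizing b with
  | nil => simp
  | cons c l ih =>
    simp only [List.foldl_cons, List.all_cons]
    by_cases h : p c
    · rw [if_pos h, ih]; simp [h]
    · rw [if_neg h, ih]; simp [h]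

-- the per-criterion checks of A and B coincide
theorem per_criterion (word : String) (crit : String) :
    (!((crit == "uppercase" && !(word.toList.any PySem.Chars.isupper)) ||
       (crit == "lowercase" && !(word.toList.any PySem.Chars.islower)) ||
       (crit == "digit" && !(word.toList.any PySem.Chars.isdigit)) ||
       (crit == "special" && !(word.toList.any (fun c => specialChars.contains (String.ofList [c])))))) =
    (!(knownCriteria.contains crit) || PySem.Set.contains (presentCategories word.toList) crit) := by
  by_cases h1 : crit = "uppercase"
  · subst h1
    rw [Bool.eq_iff_iff]
    simp [knownCriteria, PySem.Set.contains_iff, mem_presentCategories]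
  · by_cases h2 : crit = "lowercase"
    · subst h2
      rw [Bool.eq_iff_iff]
      simp [knownCriteria, PySem.Set.contains_iff, mem_presentCategories]
    · by_cases h3 : crit = "digit"
      · subst h3
        rw [Bool.eq_iff_iff]
        simp [knownCriteria, PySem.Set.contains_iff, mem_presentCategories]
      · by_cases h4 : crit = "special"
        · subst h4
          rw [Bool.eq_iff_iff]
          simp [knownCriteria, PySem.Set.contains_iff, mem_presentCategories]
        · simp [knownCriteria, h1, h2, h3, h4]

-- the two per-word step functions agree
theorem step_eq (min_length max_length : Int) (must_contain : Option (List String))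
    (filtered : List String) (word : String) :
    (if min_length ≤ PySem.Str.len word ∧ PySem.Str.len word ≤ max_length then
      match must_contain with
      | some crits =>
        if crits.isEmpty then PySem.Set.add filtered word
        else
          let meets := crits.foldl (fun m crit =>
            if crit == "uppercase" && !(word.toList.any PySem.Chars.isupper) then false
            else if crit == "lowercase" && !(word.toList.any PySem.Chars.islower) then false
            else if crit == "digit" && !(word.toList.any PySem.Chars.isdigit) then false
            else if crit == "special" && !(word.toList.any (fun c => specialChars.contains (String.ofList [c]))) then false
            else m) true
          if meets then PySem.Set.add filtered word else filtered
      | none => PySem.Set.add filtered word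
    else filtered) =
    (if ¬ (min_length ≤ PySem.Str.len word ∧ PySem.Str.len word ≤ max_length) then filtered
    else
      let present := presentCategories word.toList
      let crits := must_contain.getD []
      if crits.all (fun crit => !(knownCriteria.contains crit) || PySem.Set.contains present crit)
      then PySem.Set.add filtered word else filtered) := by
  by_cases hlen : min_length ≤ PySem.Str.len word ∧ PySem.Str.len word ≤ max_length
  · rw [if_pos hlen, if_neg (not_not_intro hlen)]
    cases must_contain with
    | none => simp
    | some crits =>
      simp only [Option.getD_some]
      cases crits with
      | nil => simp
      | cons c cs =>
        rw [if_neg (by simp : ¬(((c :: cs).isEmpty) = true))]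
        have hstep : (fun (m : Bool) (crit : String) =>
            if crit == "uppercase" && !(word.toList.any PySem.Chars.isupper) then false
            else if crit == "lowercase" && !(word.toList.any PySem.Chars.islower) then false
            else if crit == "digit" && !(word.toList.any PySem.Chars.isdigit) then false
            else if crit == "special" && !(word.toList.any (fun c => specialChars.contains (String.ofList [c]))) then false
            else m) =
            (fun (m : Bool) (crit : String) =>
              if (crit == "uppercase" && !(word.toList.any PySem.Chars.isupper)) ||
                 (crit == "lowercase" && !(word.toList.any PySem.Chars.islower)) ||
                 (crit == "digit" && !(word.toList.any PySem.Chars.isdigit)) ||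
                 (crit == "special" && !(word.toList.any (fun c => specialChars.contains (String.ofList [c])))) then false else m) := by
          funext m crit
          by_cases a1 : (crit == "uppercase" && !(word.toList.any PySem.Chars.isupper)) = true <;>
            by_cases a2 : (crit == "lowercase" && !(word.toList.any PySem.Chars.islower)) = true <;>
              by_cases a3 : (crit == "digit" && !(word.toList.any PySem.Chars.isdigit)) = true <;>
                by_cases a4 : (crit == "special" && !(word.toList.any (fun c => specialChars.contains (String.ofList [c])))) = true <;>
                  simp [a1, a2, a3, a4]
        have hall : (fun (crit : String) =>
            !((crit == "uppercase" && !(word.toList.any PySem.Chars.isupper)) ||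
              (crit == "lowercase" && !(word.toList.any PySem.Chars.islower)) ||
              (crit == "digit" && !(word.toList.any PySem.Chars.isdigit)) ||
              (crit == "special" && !(word.toList.any (fun c => specialChars.contains (String.ofList [c])))))) =
            (fun (crit : String) => !(knownCriteria.contains crit) ||
              PySem.Set.contains (presentCategories word.toList) crit) :=
          funext (fun crit => per_criterion word crit)
        simp only [hstep, foldl_if_false, Bool.true_and, hall]
        rfl
  · rw [if_neg hlen, if_pos hlen]

-- ===== VERDICT (by name: the statement is the Claim_ definition above) =====
theorem filter_wordlist_spec : Claim_equal_filter_wordlist := by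
  intro wordlist min_length max_length must_contain _
  unfold Spec_filter_wordlist filter_wordlist filter_wordlist_alt
  have h := funext (fun filtered => funext (fun word =>
    step_eq min_length max_length must_contain filtered word))
  rw [h]
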